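-- pv_equiv track=rewrite | github.com/rish664/pipeshub-ai | backend/python/app/modules/parsers/excel/excel_parser.py | _select_representative_sample_rows
-- ===== SOURCE A (Python) =====
-- from typing import Any, Dict, List, Tuple, Union
--
-- NUM_SAMPLE_ROWS = 5  # Number of representative sample rows to select for header generation
--
-- def _select_representative_sample_rows(
--     data_rows: List[List[Any]], num_sample_rows: int = NUM_SAMPLE_ROWS
-- ) -> List[Tuple[int, List[Any], int]]:
--     """
--     Select representative sample rows from data by prioritizing rows with fewer empty values.
--
--     This method selects up to num_sample_rows rows, prioritizing:
--     1. Perfect rows with no empty values (stops early if enough are found)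
--     2. Rows with the fewest empty values as fallback
--
--     Args:
--         data_rows: List of rows (each row is a list of values)
--         num_sample_rows: Number of sample rows to select (default: NUM_SAMPLE_ROWS)
--
--     Returns:
--         List of tuples (row_index, row_list, empty_count) sorted by original index
--     """
--     selected_rows = []
--     fallback_rows = []
--
--     for idx, row in enumerate(data_rows):
--         # Count empty values in this row
--         empty_count = sum(1 for value in row if value is None or (isinstance(value, str) and value.strip() == ""))
--
--         if empty_count == 0:
--             # Perfect row with no empty values
--             selected_rows.append((idx, row, empty_count))
--             if len(selected_rows) >= num_sample_rows:
--                 break  # Early stop - found enough perfect rows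
--         else:
--             # Keep track of best non-perfect rows as fallback
--             fallback_rows.append((idx, row, empty_count))
--
--     # If we didn't find enough perfect rows, supplement with the best fallback rows
--     if len(selected_rows) < num_sample_rows:
--         # Sort fallback rows by empty count (ascending), then by index
--         fallback_rows.sort(key=lambda x: (x[2], x[0]))
--         # Add the best fallback rows to reach the target count
--         needed = num_sample_rows - len(selected_rows)
--         selected_rows.extend(fallback_rows[:needed])
--
--     # Sort by original index to maintain logical order
--     selected_rows.sort(key=lambda x: x[0])
--
--     return selected_rows
-- ===== SOURCE B (Python) =====
-- NUM_SAMPLE_ROWS = 5  # Number of representative sample rows to select for header generation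
--
--
-- def _select_representative_sample_rows(data_rows, num_sample_rows=NUM_SAMPLE_ROWS):
--     """Single-pass scoring + one global min-selection instead of the
--     perfect/fallback two-phase loop."""
--     def _is_empty(value):
--         return value is None or (isinstance(value, str) and value.strip() == "")
--
--     scored = [(sum(1 for v in row if _is_empty(v)), idx, row)
--               for idx, row in enumerate(data_rows)]
--     k = max(num_sample_rows, 0)
--     best = sorted(scored, key=lambda t: (t[0], t[1]))[:k]
--     return sorted([(idx, row, cnt) for cnt, idx, row in best], key=lambda t: t[0])
-- ===== Notes on version B (the rewrite author's own statement) =====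
-- stated objective: simpler
-- what changed: Replaces the two-phase perfect/fallback loop with early break by one pass that scores every row and a single global sorted(...)[:k] selection on the (empty_count, index) key, re-sorted by index.
-- intended difference: When num_sample_rows <= 0 and the data contains a row whose every cell is a string with some non-whitespace character (a row with no empty cells), A's post-append break makes it return that first perfect row while B returns the empty list, which is the intended result when zero or fewer samples are requested. — e.g. on _select_representative_sample_rows([[some "a"]], 0): A returns [(0, [some "a"], 0)], B returns []
import Mathlib
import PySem

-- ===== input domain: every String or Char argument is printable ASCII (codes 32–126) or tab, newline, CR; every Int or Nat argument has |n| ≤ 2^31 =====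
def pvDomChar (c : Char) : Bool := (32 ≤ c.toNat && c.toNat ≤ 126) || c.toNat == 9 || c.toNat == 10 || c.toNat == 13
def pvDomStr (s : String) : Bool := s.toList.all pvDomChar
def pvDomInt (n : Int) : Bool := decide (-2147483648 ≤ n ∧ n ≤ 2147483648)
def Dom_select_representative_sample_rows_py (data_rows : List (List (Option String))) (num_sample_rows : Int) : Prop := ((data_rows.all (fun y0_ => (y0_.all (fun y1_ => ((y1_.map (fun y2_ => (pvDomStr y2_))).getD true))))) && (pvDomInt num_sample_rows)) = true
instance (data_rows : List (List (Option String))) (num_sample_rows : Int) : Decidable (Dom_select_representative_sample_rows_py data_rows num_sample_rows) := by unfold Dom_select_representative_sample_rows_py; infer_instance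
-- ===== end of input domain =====

-- B replaces A's two-phase perfect/fallback loop (with early break) by one global
-- sorted-selection on the (empty_count, index) key; the proofs below show the return
-- values agree except when num_sample_rows ≤ 0 meets a row with no empty cells (D_ below).

-- ===== PORT A =====
-- sum(1 for value in row if value is None or (isinstance(value, str) and value.strip() == ""))
def aEmptyCount (row : List (Option String)) : Int :=
  row.foldl (fun acc v =>
    if (match v with | none => true | some s => PySem.Str.strip s == "") then acc + 1 else acc) 0

-- the for-loop over enumerate(data_rows) with its early break
def aLoop (rows : List (Int × List (Option String))) (n : Int)
    (sel fb : List (Int × List (Option String) × Int)) :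
    List (Int × List (Option String) × Int) × List (Int × List (Option String) × Int) :=
  match rows with
  | [] => (sel, fb)
  | (idx, row) :: rest =>
    let c := aEmptyCount row
    if c = 0 then
      let sel' := sel ++ [(idx, row, c)]
      if n ≤ (sel'.length : Int) then (sel', fb) else aLoop rest n sel' fb
    else aLoop rest n sel (fb ++ [(idx, row, c)])

def select_representative_sample_rows_py (data_rows : List (List (Option String))) (num_sample_rows : Int) : List (Int × List (Option String) × Int) :=
  let p := aLoop (PySem.List.enumerate data_rows) num_sample_rows [] []
  let selected :=
    if ((p.1.length : Int) < num_sample_rows) then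
      -- fallback_rows.sort(key=lambda x: (x[2], x[0])); selected_rows.extend(fallback_rows[:needed])
      let fbSorted := PySem.List.sorted2 p.2 (fun x => x.2.2) (fun x => x.1)
      let needed := num_sample_rows - (p.1.length : Int)
      p.1 ++ PySem.List.slice fbSorted none (some needed)
    else p.1
  -- selected_rows.sort(key=lambda x: x[0])
  PySem.List.sorted selected (fun x => x.1)

-- ===== PORT B =====
-- sum(1 for v in row if _is_empty(v)), rendered as a count
def bEmptyCount (row : List (Option String)) : Int :=
  ((row.countP (fun v => match v with | none => true | some s => PySem.Str.strip s == "") : Nat) : Int)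

def select_representative_sample_rows_py_alt (data_rows : List (List (Option String))) (num_sample_rows : Int) : List (Int × List (Option String) × Int) :=
  let scored := (PySem.List.enumerate data_rows).map (fun q => (bEmptyCount q.2, q.1, q.2))
  let k := max num_sample_rows 0
  -- sorted(scored, key=lambda t: (t[0], t[1]))[:k]  (k ≥ 0, so [:k] is take)
  let best := (PySem.List.sorted2 scored (fun t => t.1) (fun t => t.2.1)).take k.toNat
  PySem.List.sorted (best.map (fun t => (t.2.1, t.2.2, t.1))) (fun t => t.1)

-- ===== PRECONDITION & SPEC =====
-- When num_sample_rows ≤ 0 and the data contains a row whose every cell is a string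
-- holding at least one non-whitespace character (i.e. a row with no empty cells), A's
-- post-append break makes it return that first perfect row while B returns the empty
-- list, the intended result when zero or fewer samples are requested.
-- (Closed-form shape/membership condition on the input; Dom only admits the whitespace
-- characters ' ', '\t', '\n', '\r', so "non-whitespace" is this explicit character test.)
def D_select_representative_sample_rows_py (data_rows : List (List (Option String))) (num_sample_rows : Int) : Prop :=
  num_sample_rows ≤ 0 ∧
    ∃ row ∈ data_rows, ∀ v ∈ row, ∃ s ∈ v.toList, ∃ c ∈ s.toList,
      c ≠ ' ' ∧ c ≠ '\t' ∧ c ≠ '\n' ∧ c ≠ '\r'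
instance (data_rows : List (List (Option String))) (num_sample_rows : Int) : Decidable (D_select_representative_sample_rows_py data_rows num_sample_rows) := by unfold D_select_representative_sample_rows_py; infer_instance

def Spec_select_representative_sample_rows_py (data_rows : List (List (Option String))) (num_sample_rows : Int) (out : List (Int × List (Option String) × Int)) : Prop := ¬ D_select_representative_sample_rows_py data_rows num_sample_rows → out = select_representative_sample_rows_py_alt data_rows num_sample_rows
instance (data_rows : List (List (Option String))) (num_sample_rows : Int) (out : List (Int × List (Option String) × Int)) : Decidable (Spec_select_representative_sample_rows_py data_rows num_sample_rows out) := by unfold Spec_select_representative_sample_rows_py; infer_instance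

def pvDiffWitness_select_representative_sample_rows_py : List (List (Option String)) × Int := ([[some "a"]], 0)
def pvDiffWitnessOut_select_representative_sample_rows_py : (List (Int × List (Option String) × Int)) × (List (Int × List (Option String) × Int)) := ([(0, [some "a"], 0)], [])

-- ===== CLAIM (what is proved, stated in full; the proofs are below) =====
def Claim_unchanged_select_representative_sample_rows_py : Prop := ∀ (data_rows : List (List (Option String))) (num_sample_rows : Int), Dom_select_representative_sample_rows_py data_rows num_sample_rows → Spec_select_representative_sample_rows_py data_rows num_sample_rows (select_representative_sample_rows_py data_rows num_sample_rows)
def Claim_changed_select_representative_sample_rows_py : Prop := Dom_select_representative_sample_rows_py (pvDiffWitness_select_representative_sample_rows_py.1) (pvDiffWitness_select_representative_sample_rows_py.2) ∧ D_select_representative_sample_rows_py (pvDiffWitness_select_representative_sample_rows_py.1) (pvDiffWitness_select_representative_sample_rows_py.2) ∧ select_representative_sample_rows_py (pvDiffWitness_select_representative_sample_rows_py.1) (pvDiffWitness_select_representative_sample_rows_py.2) = pvDiffWitnessOut_select_representative_sample_rows_py.1 ∧ select_representative_sample_rows_py_alt (pvDiffWitness_select_representative_sample_rows_py.1) (pvDiffWitness_select_representative_sample_rows_py.2)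 = pvDiffWitnessOut_select_representative_sample_rows_py.2 ∧ pvDiffWitnessOut_select_representative_sample_rows_py.1 ≠ pvDiffWitnessOut_select_representative_sample_rows_py.2
def Claim_exact_select_representative_sample_rows_py : Prop := ∀ (data_rows : List (List (Option String))) (num_sample_rows : Int), Dom_select_representative_sample_rows_py data_rows num_sample_rows → D_select_representative_sample_rows_py data_rows num_sample_rows → select_representative_sample_rows_py data_rows num_sample_rows ≠ select_representative_sample_rows_py_alt data_rows num_sample_rows

-- ===== LEMMAS AND PROOFS =====

-- the D_ row condition, as a named predicate for the proofs below
def dRow (row : List (Option String)) : Prop :=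
  ∀ v ∈ row, ∃ s ∈ v.toList, ∃ c ∈ s.toList, c ≠ ' ' ∧ c ≠ '\t' ∧ c ≠ '\n' ∧ c ≠ '\r'

-- abbreviations for the perfect / imperfect tuples of the enumerated input, A-shaped (idx, row, cnt)
def ptA (E : List (Int × List (Option String))) : List (Int × List (Option String) × Int) :=
  (E.filter (fun q => aEmptyCount q.2 == 0)).map (fun q => (q.1, q.2, aEmptyCount q.2))
def ftA (E : List (Int × List (Option String))) : List (Int × List (Option String) × Int) :=
  (E.filter (fun q => !(aEmptyCount q.2 == 0))).map (fun q => (q.1, q.2, aEmptyCount q.2))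

theorem cnt_fun : aEmptyCount = bEmptyCount := by
  funext row
  unfold aEmptyCount bEmptyCount
  suffices h : ∀ (t : List (Option String)) (a : Int),
      t.foldl (fun acc v =>
        if (match v with | none => true | some s => PySem.Str.strip s == "") then acc + 1 else acc) a
        = a + ((t.countP (fun v => match v with | none => true | some s => PySem.Str.strip s == "") : Nat) : Int) by
    simpa using h row 0
  intro t
  induction t with
  | nil => intro a; simp
  | cons v t ih =>
    intro a
    simp only [List.foldl_cons, List.countP_cons, ih]
    by_cases hv : (match v with | none => true | some s => PySem.Str.strip s == "") = true <;>
      simp [hv] <;> omega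

theorem cnt_nonneg (row : List (Option String)) : 0 ≤ aEmptyCount row := by
  rw [cnt_fun]; unfold bEmptyCount; positivity

-- Python str.strip() is empty exactly when every character is whitespace
theorem strip_eq_nil_iff (cs : List Char) :
    PySem.Chars.strip cs = [] ↔ ∀ c ∈ cs, PySem.Chars.isspace c = true := by
  unfold PySem.Chars.strip PySem.Chars.rstrip PySem.Chars.lstrip
  constructor
  · intro h c hc
    rw [List.reverse_eq_nil_iff, List.dropWhile_eq_nil_iff] at h
    rw [← List.takeWhile_append_dropWhile (p := PySem.Chars.isspace) (l := cs)] at hc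
    rcases List.mem_append.mp hc with h1 | h1
    · exact List.mem_takeWhile_imp h1
    · exact h c (List.mem_reverse.2 h1)
  · intro h
    rw [List.dropWhile_eq_nil_iff.2 h]
    simp

theorem isspace_dom (c : Char) (h : pvDomChar c = true) :
    PySem.Chars.isspace c = true ↔ (c = ' ' ∨ c = '\t' ∨ c = '\n' ∨ c = '\r') := by
  have hval : ∀ d : Char, c = d ↔ c.toNat = d.toNat := fun d =>
    ⟨fun h => by rw [h], fun h => Char.ext (UInt32.toNat_inj.mp h)⟩
  rw [hval ' ', hval '\t', hval '\n', hval '\r']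
  simp only [pvDomChar, Bool.or_eq_true, Bool.and_eq_true, beq_iff_eq, decide_eq_true_eq] at h
  simp only [PySem.Chars.isspace, Bool.or_eq_true, Bool.and_eq_true, decide_eq_true_eq]
  show _ ↔ (c.toNat = 32 ∨ c.toNat = 9 ∨ c.toNat = 10 ∨ c.toNat = 13)
  omega

-- within Dom, a string cell is non-empty exactly when it has a non-whitespace character
theorem strip_nonempty_iff (s : String) (hs : pvDomStr s = true) :
    (PySem.Str.strip s == "") = false
      ↔ ∃ c ∈ s.toList, c ≠ ' ' ∧ c ≠ '\t' ∧ c ≠ '\n' ∧ c ≠ '\r' := by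
  have hbridge : (PySem.Str.strip s == "") = true ↔ PySem.Chars.strip s.toList = [] := by
    constructor
    · intro h
      have h1 : PySem.Str.strip s = "" := by simpa using h
      have h2 := PySem.Str.toList_strip s
      rw [h1] at h2
      exact h2.symm
    · intro h
      have h2 := PySem.Str.toList_strip s
      rw [h] at h2
      simp [String.toList_eq_nil_iff.mp h2]
  have hws : ∀ c ∈ s.toList, pvDomChar c = true := fun c hc => by
    simpa using List.all_eq_true.mp hs c hc
  constructor
  · intro h
    have hne : ¬ PySem.Chars.strip s.toList = [] := fun he => by
      rw [← hbridge] at he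
      rw [he] at h
      exact absurd h (by simp)
    rw [strip_eq_nil_iff] at hne
    push_neg at hne
    obtain ⟨c, hc, hcw⟩ := hne
    have hcw2 := (isspace_dom c (hws c hc)).not.mp (by simpa using hcw)
    push_neg at hcw2
    exact ⟨c, hc, hcw2⟩
  · rintro ⟨c, hc, hcw⟩
    have hcsp : ¬ PySem.Chars.isspace c = true := by
      rw [isspace_dom c (hws c hc)]
      push_neg
      exact hcw
    have hne : ¬ PySem.Chars.strip s.toList = [] :=
      fun he => hcsp ((strip_eq_nil_iff _).mp he c hc)
    rw [← hbridge] at hne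
    simpa using hne

-- within Dom, a row counts zero empties exactly when dRow holds
theorem count_zero_iff (row : List (Option String))
    (hrow : ∀ v ∈ row, ∀ s, v = some s → pvDomStr s = true) :
    aEmptyCount row = 0 ↔ dRow row := by
  rw [cnt_fun]
  unfold bEmptyCount dRow
  rw [show ((((row.countP (fun v => match v with | none => true | some s => PySem.Str.strip s == "") : Nat) : Int)) = 0 ↔ (row.countP (fun v => match v with | none => true | some s => PySem.Str.strip s == "") = 0)) from by omega]
  rw [List.countP_eq_zero]
  constructor <;> intro h v hv
  · cases v with
    | none => exact absurd rfl (h none hv)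
    | some s =>
      have hf : (PySem.Str.strip s == "") = false := by
        have := h (some s) hv
        simpa using this
      simpa using (strip_nonempty_iff s (hrow _ hv s rfl)).mp hf
  · cases v with
    | none =>
      have := h none hv
      simp at this
    | some s =>
      have hd := h (some s) hv
      simp only [Option.toList_some, List.mem_singleton] at hd
      obtain ⟨s', hs', hc⟩ := hd
      subst hs'
      have hf := (strip_nonempty_iff s' (hrow _ hv s' rfl)).mpr hc
      simp [hf]

-- extract the per-string Dom facts
theorem dom_strings (data_rows : List (List (Option String))) (n : Int)
    (h : Dom_select_representative_sample_rows_py data_rows n) :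
    ∀ row ∈ data_rows, ∀ v ∈ row, ∀ s, v = some s → pvDomStr s = true := by
  unfold Dom_select_representative_sample_rows_py at h
  rw [Bool.and_eq_true, List.all_eq_true] at h
  intro row hrow v hv s hs
  have h1 := List.all_eq_true.mp (h.1 row hrow) v hv
  rw [hs] at h1
  simpa using h1

-- the tuple-key sort is the lexicographic single-key sort
theorem sorted2_eq_sorted_lex {α : Type} (xs : List α) (k1 k2 : α → Int) :
    PySem.List.sorted2 xs k1 k2 = PySem.List.sorted xs (fun a => toLex (k1 a, k2 a)) := by
  have hbef : (fun (a b : α) => decide (k1 a < k1 b) || (!decide (k1 b < k1 a) && decide (k2 a < k2 b)))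
      = fun a b => decide ((fun a => toLex (k1 a, k2 a)) a < (fun a => toLex (k1 a, k2 a)) b) := by
    funext a b
    by_cases h1 : k1 a < k1 b <;> by_cases h2 : k1 b < k1 a <;> by_cases h3 : k2 a < k2 b <;>
      by_cases h4 : k1 a = k1 b <;>
      simp [Prod.Lex.lt_iff, h1, h2, h3, h4] <;> omega
  simp only [PySem.List.sorted2, PySem.List.sorted, Bool.false_eq_true, if_false, reduceIte]
  rw [hbef]

-- insertion sort of a mapped list
theorem insertBy_map {α β : Type} (g : α → β) (bef : β → β → Bool) (x : α) (l : List α) :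
    PySem.List.insertBy bef (g x) (l.map g)
      = (PySem.List.insertBy (fun a b => bef (g a) (g b)) x l).map g := by
  induction l with
  | nil => simp [PySem.List.insertBy]
  | cons y t ih => simp [PySem.List.insertBy]; split <;> simp_all

theorem foldl_insertBy_map {α β : Type} (g : α → β) (bef : β → β → Bool) (l : List α)
    (acc : List α) :
    List.foldl (fun a x => PySem.List.insertBy bef x a) (acc.map g) (l.map g)
      = (List.foldl (fun a x => PySem.List.insertBy (fun a b => bef (g a) (g b)) x a) acc l).map g := by
  induction l generalizing acc with
  | nil => simp
  | cons y t ih => simpa [insertBy_map] using ih _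

theorem sorted_map {α β κ : Type} [LT κ] [DecidableLT κ] (g : α → β) (key : β → κ) (l : List α) :
    PySem.List.sorted (l.map g) key = (PySem.List.sorted l (fun a => key (g a))).map g := by
  simp only [PySem.List.sorted, Bool.false_eq_true, if_false, reduceIte]
  simpa using foldl_insertBy_map g (fun a b => decide (key a < key b)) l []

-- loop characterisations -------------------------------------------------------

theorem aLoop_none (E : List (Int × List (Option String))) (n : Int)
    (sel fb : List (Int × List (Option String) × Int)) (h : ptA E = []) :
    aLoop E n sel fb = (sel, fb ++ ftA E) := by
  induction E generalizing fb with
  | nil => simp [aLoop, ftA]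
  | cons q rest ih =>
    obtain ⟨i, r⟩ := q
    have hc : ¬ aEmptyCount r = 0 := by
      intro hc
      simp [ptA, List.filter_cons, hc] at h
    simp only [ptA, List.filter_cons] at h
    rw [if_neg (by simpa using hc)] at h
    simp only [aLoop]
    rw [if_neg hc]
    rw [ih _ h]
    simp [ftA, List.filter_cons, hc]

theorem aLoop_all (E : List (Int × List (Option String))) (n : Int)
    (sel fb : List (Int × List (Option String) × Int))
    (h : (sel.length : Int) + (ptA E).length < n) :
    aLoop E n sel fb = (sel ++ ptA E, fb ++ ftA E) := by
  induction E generalizing sel fb with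
  | nil => simp [aLoop, ptA, ftA]
  | cons q rest ih =>
    obtain ⟨i, r⟩ := q
    by_cases hc : aEmptyCount r = 0
    · have hpt : ptA ((i, r) :: rest) = (i, r, aEmptyCount r) :: ptA rest := by
        simp [ptA, List.filter_cons, hc]
      have hft : ftA ((i, r) :: rest) = ftA rest := by
        simp [ftA, List.filter_cons, hc]
      rw [hpt] at h
      simp only [List.length_cons] at h
      simp only [aLoop]
      rw [if_pos hc]
      rw [if_neg (by simp; push_cast at h ⊢; omega)]
      rw [ih _ _ (by simp; push_cast at h ⊢; omega)]
      simp [hpt, hft]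
    · have hpt : ptA ((i, r) :: rest) = ptA rest := by
        simp [ptA, List.filter_cons, hc]
      have hft : ftA ((i, r) :: rest) = (i, r, aEmptyCount r) :: ftA rest := by
        simp [ftA, List.filter_cons, hc]
      rw [hpt] at h
      simp only [aLoop]
      rw [if_neg hc]
      rw [ih _ _ h]
      simp [hpt, hft]

theorem aLoop_break (E : List (Int × List (Option String))) (n : Int)
    (sel fb : List (Int × List (Option String) × Int))
    (h : n ≤ (sel.length : Int) + (ptA E).length) (h2 : (sel.length : Int) < n) :
    (aLoop E n sel fb).1 = sel ++ (ptA E).take (n - sel.length).toNat := by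
  induction E generalizing sel fb with
  | nil =>
    exfalso; simp [ptA] at h; omega
  | cons q rest ih =>
    obtain ⟨i, r⟩ := q
    by_cases hc : aEmptyCount r = 0
    · have hpt : ptA ((i, r) :: rest) = (i, r, aEmptyCount r) :: ptA rest := by
        simp [ptA, List.filter_cons, hc]
      rw [hpt] at h ⊢
      simp only [List.length_cons] at h
      simp only [aLoop]
      rw [if_pos hc]
      by_cases hbrk : n ≤ ((sel ++ [(i, r, aEmptyCount r)]).length : Int)
      · rw [if_pos hbrk]
        simp only [List.length_append, List.length_cons, List.length_nil] at hbrk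
        have hn : (n - (sel.length : Int)).toNat = 1 := by push_cast at hbrk; omega
        simp [hn]
      · rw [if_neg hbrk]
        simp only [List.length_append, List.length_cons, List.length_nil] at hbrk
        push_cast at hbrk
        rw [ih _ _ (by simp; push_cast; omega) (by simp; push_cast; omega)]
        have hn : (n - (sel.length : Int)).toNat = ((n - ((sel.length : Int) + 1)).toNat) + 1 := by omega
        simp [hn, List.take_succ_cons]
    · have hpt : ptA ((i, r) :: rest) = ptA rest := by
        simp [ptA, List.filter_cons, hc]
      rw [hpt] at h ⊢
      simp only [aLoop]
      rw [if_neg hc]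
      exact ih _ _ h h2

theorem aLoop_ne_nil (E : List (Int × List (Option String))) (n : Int)
    (hn : n ≤ 0) (hp : ptA E ≠ []) (sel fb : List (Int × List (Option String) × Int)) :
    (aLoop E n sel fb).1 ≠ [] := by
  induction E generalizing sel fb with
  | nil => simp [ptA] at hp
  | cons q rest ih =>
    obtain ⟨i, r⟩ := q
    by_cases hc : aEmptyCount r = 0
    · simp only [aLoop]
      rw [if_pos hc]
      rw [if_pos (by simp; push_cast; omega)]
      simp
    · have hpt : ptA ((i, r) :: rest) = ptA rest := by
        simp [ptA, List.filter_cons, hc]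
      rw [hpt] at hp
      simp only [aLoop]
      rw [if_neg hc]
      exact ih hp _ _

-- sorted split -----------------------------------------------------------------

theorem pairwise_strengthen {α : Type} {R K : α → α → Prop} {q : α → Prop} :
    ∀ (l : List α), (∀ x ∈ l, q x) → l.Pairwise R →
      (∀ a b, q a → q b → R a b → K a b) → l.Pairwise K
  | [], _, _, _ => List.Pairwise.nil
  | x :: t, hq, hR, h => by
    rw [List.pairwise_cons] at hR ⊢
    exact ⟨fun y hy => h x y (hq x (by simp)) (hq y (by simp [hy])) (hR.1 y hy),
      pairwise_strengthen t (fun z hz => hq z (by simp [hz])) hR.2 h⟩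

theorem ptA_map_eq (L : List (Int × List (Option String))) :
    ((ptA L).map (fun t => (t.2.2, t.1, t.2.1)))
      = (L.map (fun q => (aEmptyCount q.2, q.1, q.2))).filter (fun t => t.1 == 0) := by
  induction L with
  | nil => simp [ptA]
  | cons q t ih =>
    by_cases hq : (aEmptyCount q.2 == 0) = true <;>
      simp [ptA, List.filter_cons, hq] at ih ⊢ <;> exact ih

theorem ftA_map_eq (L : List (Int × List (Option String))) :
    ((ftA L).map (fun t => (t.2.2, t.1, t.2.1)))
      = (L.map (fun q => (aEmptyCount q.2, q.1, q.2))).filter (fun t => !(t.1 == 0)) := by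
  induction L with
  | nil => simp [ftA]
  | cons q t ih =>
    by_cases hq : (aEmptyCount q.2 == 0) = true <;>
      simp [ftA, List.filter_cons, hq] at ih ⊢ <;> exact ih

theorem sorted_scored_split (E : List (Int × List (Option String)))
    (hE : E.Pairwise (fun a b => a.1 < b.1)) :
    PySem.List.sorted ((E.map (fun q => (aEmptyCount q.2, q.1, q.2))))
        (fun t => toLex (t.1, t.2.1))
      = (ptA E).map (fun t => (t.2.2, t.1, t.2.1))
        ++ PySem.List.sorted ((ftA E).map (fun t => (t.2.2, t.1, t.2.1)))
            (fun t => toLex (t.1, t.2.1)) := by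
  have hpairS : (E.map (fun q => (aEmptyCount q.2, q.1, q.2))).Pairwise
      (fun a b => a.2.1 < b.2.1) := by
    rw [List.pairwise_map]; exact hE
  have hnonneg : ∀ t ∈ (E.map (fun q => (aEmptyCount q.2, q.1, q.2))), 0 ≤ t.1 := by
    intro t ht
    rw [List.mem_map] at ht
    obtain ⟨q, _, rfl⟩ := ht
    exact cnt_nonneg _
  apply PySem.List.sorted_eq_of_perm_of_pairwise_lt
  · -- permutation
    refine List.Perm.trans ?_
      (List.filter_append_perm (fun t => t.1 == 0) (E.map (fun q => (aEmptyCount q.2, q.1, q.2))))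
    refine List.Perm.append (ptA_map_eq E ▸ List.Perm.refl _)
      ((PySem.List.sorted_perm _ _ _).trans (ftA_map_eq E ▸ List.Perm.refl _))
  · -- pairwise strict lex order
    rw [List.pairwise_append]
    refine ⟨?_, ?_, ?_⟩
    · rw [ptA_map_eq]
      refine pairwise_strengthen (q := fun t => t.1 = 0) _ ?_ (hpairS.filter _) ?_
      · intro x hx
        have := (List.mem_filter.1 hx).2
        simpa using this
      · intro a b ha hb hr
        simp [Prod.Lex.lt_iff, ha, hb, hr]
    · have hperm : (PySem.List.sorted ((ftA E).map (fun t => (t.2.2, t.1, t.2.1)))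
          (fun t => toLex (t.1, t.2.1))).Perm ((ftA E).map (fun t => (t.2.2, t.1, t.2.1))) :=
        PySem.List.sorted_perm _ _ _
      have hle := PySem.List.sorted_pairwise ((ftA E).map (fun t => (t.2.2, t.1, t.2.1)))
        (fun t => toLex (t.1, t.2.1))
      have hne0 : ((ftA E).map (fun t => (t.2.2, t.1, t.2.1))).Pairwise
          (fun a b => a.2.1 ≠ b.2.1) := by
        rw [ftA_map_eq]
        exact (hpairS.imp (fun h => ne_of_lt h)).filter _
      have hne : (PySem.List.sorted ((ftA E).map (fun t => (t.2.2, t.1, t.2.1)))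
          (fun t => toLex (t.1, t.2.1))).Pairwise (fun a b => a.2.1 ≠ b.2.1) := by
        refine (List.Perm.pairwise_iff ?_ hperm).2 hne0
        intro a b h he
        exact h he.symm
      refine (hle.and hne).imp ?_
      intro a b hab
      refine lt_of_le_of_ne hab.1 ?_
      intro hkey
      have : a.2.1 = b.2.1 := by
        have := congrArg (fun x => (ofLex x).2) hkey
        simpa using this
      exact hab.2 this
    · intro a ha b hb
      have ha0 : a.1 = 0 := by
        rw [ptA_map_eq] at ha
        have := (List.mem_filter.1 ha).2
        simpa using this
      have hb' : b ∈ ((ftA E).map (fun t => (t.2.2, t.1, t.2.1))) :=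
        (PySem.List.sorted_perm _ _ _).mem_iff.1 hb
      rw [ftA_map_eq] at hb'
      have hbm := List.mem_filter.1 hb'
      have hbne : ¬ b.1 = 0 := by simpa using hbm.2
      have hbpos : 0 < b.1 := lt_of_le_of_ne (hnonneg b hbm.1) (Ne.symm hbne)
      simp [Prod.Lex.lt_iff]
      left
      omega

theorem map_g_toA (l : List (Int × List (Option String) × Int)) :
    (l.map (fun t => (t.2.2, t.1, t.2.1))).map
        (fun t : Int × Int × List (Option String) => (t.2.1, t.2.2, t.1)) = l := by
  induction l with
  | nil => rfl
  | cons x t ih => simp [ih]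

theorem F_map_toA (l : List (Int × List (Option String) × Int)) :
    ((PySem.List.sorted (l.map (fun t => (t.2.2, t.1, t.2.1))) (fun t => toLex (t.1, t.2.1))).map
        (fun t : Int × Int × List (Option String) => (t.2.1, t.2.2, t.1)))
      = PySem.List.sorted l (fun t => toLex (t.2.2, t.1)) := by
  rw [sorted_map]
  exact map_g_toA _

theorem no_perfect_ptA (data_rows : List (List (Option String)))
    (hdom : ∀ row ∈ data_rows, ∀ v ∈ row, ∀ s, v = some s → pvDomStr s = true)
    (h : ∀ row ∈ data_rows, ¬ dRow row) :
    ptA (PySem.List.enumerate data_rows) = [] := by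
  rw [ptA, List.map_eq_nil_iff, List.filter_eq_nil_iff]
  intro q hq
  rw [PySem.List.mem_enumerate_iff] at hq
  obtain ⟨k, hk, rfl⟩ := hq
  have hmem : data_rows[k] ∈ data_rows := List.getElem_mem hk
  have := h _ hmem
  rw [← count_zero_iff _ (hdom _ hmem)] at this
  simpa using this

-- ===== VERDICT (by name: the statement is the Claim_ definition above) =====
theorem select_representative_sample_rows_py_spec : Claim_unchanged_select_representative_sample_rows_py := by
  intro data_rows n hDom hD
  show select_representative_sample_rows_py data_rows n
      = select_representative_sample_rows_py_alt data_rows n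
  simp only [select_representative_sample_rows_py, select_representative_sample_rows_py_alt,
    ← cnt_fun, sorted2_eq_sorted_lex]
  have hE : (PySem.List.enumerate data_rows).Pairwise (fun a b => a.1 < b.1) :=
    PySem.List.pairwise_lt_enumerate _ _
  rw [sorted_scored_split _ hE]
  by_cases hn : 0 < n
  · have hmax : max n 0 = n := by omega
    rw [hmax]
    by_cases hm : ((ptA (PySem.List.enumerate data_rows)).length : Int) < n
    · -- not enough perfect rows: the loop runs to the end
      rw [aLoop_all _ n [] [] (by simpa using hm)]
      dsimp only
      simp only [List.nil_append]
      rw [if_pos hm]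
      rw [show n - ((ptA (PySem.List.enumerate data_rows)).length : Int)
            = (((n - (ptA (PySem.List.enumerate data_rows)).length).toNat : Nat) : Int) by omega]
      rw [PySem.List.slice_to_natCast]
      rw [List.take_append, List.map_append]
      have htk : (((ptA (PySem.List.enumerate data_rows)).map
            (fun t => (t.2.2, t.1, t.2.1))).take n.toNat)
          = ((ptA (PySem.List.enumerate data_rows)).map (fun t => (t.2.2, t.1, t.2.1))) :=
        List.take_of_length_le (by simp; omega)
      rw [htk, map_g_toA]
      congr 1
      rw [List.map_take, F_map_toA]
      congr 1
      simp
    · -- enough perfect rows: the loop breaks early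
      have hA1 : (aLoop (PySem.List.enumerate data_rows) n [] []).1
          = (ptA (PySem.List.enumerate data_rows)).take n.toNat := by
        rw [aLoop_break _ n [] [] (by simpa using hm) (by simp; omega)]
        simp
      rw [hA1]
      have hlen : (((ptA (PySem.List.enumerate data_rows)).take n.toNat).length : Int) = n := by
        simp; omega
      rw [if_neg (by omega)]
      rw [List.take_append]
      rw [show n.toNat - ((ptA (PySem.List.enumerate data_rows)).map
            (fun t => (t.2.2, t.1, t.2.1))).length = 0 by simp; omega]
      rw [List.take_zero, List.append_nil]
      rw [List.map_take, map_g_toA]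
  · -- n ≤ 0 and (by ¬D_) no row satisfies dRow: both sides are empty
    push_neg at hn
    have hany : ∀ row ∈ data_rows, ¬ dRow row := by
      intro row hrow hd
      exact hD ⟨hn, row, hrow, hd⟩
    have hpt := no_perfect_ptA data_rows (dom_strings data_rows n hDom) hany
    rw [aLoop_none _ n [] [] hpt]
    dsimp only
    rw [if_neg (by simp; omega)]
    simp [PySem.List.sorted, show (max n 0).toNat = 0 by omega]

theorem select_representative_sample_rows_py_changed : Claim_changed_select_representative_sample_rows_py := by
  unfold Claim_changed_select_representative_sample_rows_py
  refine ⟨by decide, ⟨by decide, ?_⟩, by decide, by decide, by decide⟩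
  refine ⟨[some "a"], by simp [pvDiffWitness_select_representative_sample_rows_py], ?_⟩
  intro v hv
  simp only [List.mem_singleton] at hv
  subst hv
  exact ⟨"a", by simp, 'a', by decide, by decide, by decide, by decide, by decide⟩

theorem select_representative_sample_rows_py_tight : Claim_exact_select_representative_sample_rows_py := by
  intro data_rows n hDom hD heq
  obtain ⟨hn, row, hrow, hd⟩ := hD
  have hB : select_representative_sample_rows_py_alt data_rows n = [] := by
    simp only [select_representative_sample_rows_py_alt]
    rw [show (max n 0).toNat = 0 by omega]
    rw [List.take_zero, List.map_nil]
    rfl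
  have hpt : ptA (PySem.List.enumerate data_rows) ≠ [] := by
    obtain ⟨k, hk, rfl⟩ := List.getElem_of_mem hrow
    have hcnt : aEmptyCount data_rows[k] = 0 :=
      (count_zero_iff _ (dom_strings data_rows n hDom _ (List.getElem_mem hk))).mpr hd
    intro h0
    have hmem : ((0:Int) + k, data_rows[k]) ∈ PySem.List.enumerate data_rows := by
      rw [PySem.List.mem_enumerate_iff]
      exact ⟨k, hk, rfl⟩
    have hin : ((0:Int) + k, data_rows[k], aEmptyCount data_rows[k])
        ∈ ptA (PySem.List.enumerate data_rows) := by
      rw [ptA]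
      exact List.mem_map_of_mem (List.mem_filter.2 ⟨hmem, by simpa using hcnt⟩)
    rw [h0] at hin
    simp at hin
  have hAne : select_representative_sample_rows_py data_rows n ≠ [] := by
    simp only [select_representative_sample_rows_py]
    have h1 := aLoop_ne_nil (PySem.List.enumerate data_rows) n hn hpt [] []
    rw [if_neg (by have := Int.natCast_nonneg ((aLoop (PySem.List.enumerate data_rows) n [] []).1.length); omega)]
    rw [Ne, PySem.List.sorted_eq_nil_iff]
    exact h1
  exact hAne (heq.trans hB)
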